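-- pv_equiv track=rewrite | github.com/lesleslie/crackerjack | crackerjack/agents/performance_agent.py | _apply_list_comprehension_optimizations
-- ===== SOURCE A (Python) =====
-- import operator
-- import typing as t
--
-- def _apply_list_comprehension_optimizations(
--     lines: list[str],
--     issue: dict[str, t.Any],
-- ) -> tuple[list[str], bool]:
--     """Apply list comprehension optimizations where detected."""
--     modified = False
--
--     instances = issue.get("instances", [])
--     for instance in sorted(
--         instances, key=operator.itemgetter("line_number"), reverse=True
--     ):
--         line_idx = instance["line_number"] - 1
--         if line_idx < len(lines):
--             original_line = lines[line_idx]
--             indent = original_line[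
--                 : len(original_line) - len(original_line.lstrip())
--             ]
--
--             # Add suggestion comment for now - actual transformation would need more AST analysis
--             comment = (
--                 f"{indent}# Performance: Consider list comprehension for "
--                 f"20-30% improvement"
--             )
--             lines.insert(line_idx, comment)
--             modified = True
--
--     return lines, modified
-- ===== SOURCE B (Python) =====
-- def _apply_list_comprehension_optimizations(
--     lines: list[str],
--     issue,
-- ):
--     """Apply list comprehension optimizations: count flagged lines once, rebuild in one pass."""
--     counts = {}
--     modified = False
--     for instance in issue.get("instances", []):
--         line_idx = instance["line_number"] - 1
--         if 0 <= line_idx < len(lines):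
--             counts[line_idx] = counts.get(line_idx, 0) + 1
--             modified = True
--     rebuilt = []
--     for i, line in enumerate(lines):
--         indent = line[: len(line) - len(line.lstrip())]
--         comment = (
--             f"{indent}# Performance: Consider list comprehension for "
--             f"20-30% improvement"
--         )
--         rebuilt.extend([comment] * counts.get(i, 0))
--         rebuilt.append(line)
--     lines[:] = rebuilt
--     return lines, modified
-- ===== Notes on version B (the rewrite author's own statement) =====
-- stated objective: alternative
-- what changed: A sorts instances by line_number descending and repeatedly list.insert()s a comment above each flagged line; B makes one pass tallying line_idx -> count into a dict and one forward pass rebuilding the list (emitting count copies of the comment before each line), writing it back with lines[:] = rebuilt.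
import Mathlib
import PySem

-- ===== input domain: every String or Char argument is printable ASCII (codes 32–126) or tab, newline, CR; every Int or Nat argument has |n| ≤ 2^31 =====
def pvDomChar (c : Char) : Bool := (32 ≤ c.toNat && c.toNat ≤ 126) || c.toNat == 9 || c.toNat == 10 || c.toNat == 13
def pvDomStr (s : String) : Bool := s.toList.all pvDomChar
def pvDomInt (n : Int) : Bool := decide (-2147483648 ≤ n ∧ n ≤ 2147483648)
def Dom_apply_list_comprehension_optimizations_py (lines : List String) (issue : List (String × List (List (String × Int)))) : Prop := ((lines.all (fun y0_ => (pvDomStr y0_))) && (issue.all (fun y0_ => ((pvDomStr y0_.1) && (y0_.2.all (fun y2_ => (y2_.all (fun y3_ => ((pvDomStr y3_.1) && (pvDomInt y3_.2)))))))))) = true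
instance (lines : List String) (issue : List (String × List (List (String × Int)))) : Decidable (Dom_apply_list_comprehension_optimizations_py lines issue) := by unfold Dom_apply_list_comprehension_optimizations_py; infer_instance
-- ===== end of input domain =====

-- B replaces A's sort-descending + repeated list.insert with one counting pass plus one forward
-- rebuild pass (alternative decomposition).  Equivalence is about the RETURN value; both Pythons
-- also mutate `lines` in place to that same value (A via insert, B via lines[:] = rebuilt).

-- ===== PORT A =====
-- shared helper: both Pythons build the comment string the same way
-- (indent = original_line[: len(original_line) - len(original_line.lstrip())], then the f-string)
def pvComment (s : String) : String :=
  String.ofList (PySem.List.slice s.toList none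
      (some (PySem.Chars.len s.toList - PySem.Chars.len (PySem.Chars.lstrip s.toList))) ++
    "# Performance: Consider list comprehension for 20-30% improvement".toList)


-- the for-loop over the (descending-sorted) instances; `none` = a Python exception
-- (KeyError on a missing "line_number", IndexError on lines[line_idx])
def pvLoopA : List (List (String × Int)) → List String → Bool → Option (List String × Bool)
  | [], ls, m => some (ls, m)
  | inst :: rest, ls, m =>
    match inst.lookup "line_number" with
    | none => none
    | some n =>
      if n - 1 < PySem.List.len ls then
        match PySem.List.pyGet? ls (n - 1) with
        | none => none
        | some orig => pvLoopA rest (PySem.List.insert ls (n - 1) (pvComment orig)) true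
      else pvLoopA rest ls m

def apply_list_comprehension_optimizations_py (lines : List String) (issue : List (String × List (List (String × Int)))) : List String × Bool :=
  let instances := (issue.lookup "instances").getD []
  let sortedI := PySem.List.sorted instances (fun t => (t.lookup "line_number").getD 0) true
  (pvLoopA sortedI lines false).getD (lines, false)


-- ===== PORT B =====
-- first pass of Source B: tally line_idx → count (KeyError = none)
def pvLoopB : List (List (String × Int)) → Int → PySem.Dict Int Int → Bool → Option (PySem.Dict Int Int × Bool)
  | [], _, cnt, m => some (cnt, m)
  | inst :: rest, nl, cnt, m =>
    match inst.lookup "line_number" with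
    | none => none
    | some n =>
      let idx := n - 1
      if 0 ≤ idx ∧ idx < nl then
        pvLoopB rest nl (cnt.insert idx (cnt.getD idx 0 + 1)) true
      else pvLoopB rest nl cnt m


-- second pass of Source B: rebuilt.extend([comment] * counts.get(i, 0)); rebuilt.append(line)
def pvRebuild (cnt : PySem.Dict Int Int) (lines : List String) : List String :=
  (PySem.List.enumerate lines).foldl
    (fun acc p => acc ++ List.replicate (cnt.getD p.1 0).toNat (pvComment p.2) ++ [p.2]) []


def apply_list_comprehension_optimizations_py_alt (lines : List String) (issue : List (String × List (List (String × Int)))) : List String × Bool :=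
  let instances := (issue.lookup "instances").getD []
  match pvLoopB instances (PySem.List.len lines) PySem.Dict.empty false with
  | none => (lines, false)
  | some (cnt, m) => (pvRebuild cnt lines, m)


-- ===== PRECONDITION & SPEC =====
-- Pre_ restricts to well-formed issues: every instance has a "line_number" key with value ≥ 1
-- (1-based line numbers, the function's natural domain).  A missing key is a KeyError and an
-- index below -len(lines) an IndexError (A raises, port A returns none → getD); for the narrow
-- remaining band of non-positive line numbers A still returns a value via Python's
-- negative-index wraparound on lines[line_idx] — a malformed-input accident we exclude rather
-- than reproduce (see claim cites).
def Pre_apply_list_comprehension_optimizations_py (lines : List String) (issue : List (String × List (List (String × Int)))) : Prop :=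
  ∀ t ∈ (issue.lookup "instances").getD [], 1 ≤ (t.lookup "line_number").getD 0
instance (lines : List String) (issue : List (String × List (List (String × Int)))) : Decidable (Pre_apply_list_comprehension_optimizations_py lines issue) := by unfold Pre_apply_list_comprehension_optimizations_py; infer_instance

def pvWitness_apply_list_comprehension_optimizations_py : List String × (List (String × List (List (String × Int)))) :=
  (["def f():", "    for x in xs:", "        out.append(x)"],
   [("instances", [[("line_number", 3)], [("line_number", 3)], [("line_number", 99)]])])

def Spec_apply_list_comprehension_optimizations_py (lines : List String) (issue : List (String × List (List (String × Int)))) (out : List String × Bool) : Prop := out = apply_list_comprehension_optimizations_py_alt lines issue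
instance (lines : List String) (issue : List (String × List (List (String × Int)))) (out : List String × Bool) : Decidable (Spec_apply_list_comprehension_optimizations_py lines issue out) := by unfold Spec_apply_list_comprehension_optimizations_py; infer_instance

-- ===== CLAIM (what is proved, stated in full; the proofs are below) =====
def Claim_equal_apply_list_comprehension_optimizations_py : Prop := ∀ (lines : List String) (issue : List (String × List (List (String × Int)))), Dom_apply_list_comprehension_optimizations_py lines issue → Pre_apply_list_comprehension_optimizations_py lines issue → Spec_apply_list_comprehension_optimizations_py lines issue (apply_list_comprehension_optimizations_py lines issue)

-- ===== LEMMAS AND PROOFS =====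

theorem tw_app (p : Char → Bool) (w C : List Char) (hw : ∀ c ∈ w, p c = true) :
    List.takeWhile p (w ++ C) = w ++ C.takeWhile p := by
  induction w with
  | nil => simp
  | cons a t ih =>
      simp [hw a (by simp)]
      exact ih (fun c hc => hw c (by simp [hc]))


theorem pvComment_toList (s : String) :
    (pvComment s).toList = s.toList.takeWhile PySem.Chars.isspace ++
      "# Performance: Consider list comprehension for 20-30% improvement".toList := by
  have h1 : PySem.Chars.lstrip s.toList = s.toList.dropWhile PySem.Chars.isspace := rfl
  have hlen := congrArg List.length (List.takeWhile_append_dropWhile (p := PySem.Chars.isspace) (l := s.toList))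
  simp only [List.length_append] at hlen
  have hsl : s.length = s.toList.length := String.length_toList.symm
  have hb : (0:Int) ≤ (PySem.Chars.len s.toList - PySem.Chars.len (PySem.Chars.lstrip s.toList)) := by
    simp [PySem.Chars.len_eq, h1]; exact_mod_cast List.length_dropWhile_le _ _
  simp only [pvComment, String.toList_ofList]
  rw [PySem.List.slice_to _ hb]
  congr 1
  have ht : ((PySem.Chars.len s.toList - PySem.Chars.len (PySem.Chars.lstrip s.toList))).toNat
      = (s.toList.takeWhile PySem.Chars.isspace).length := by
    simp [PySem.Chars.len_eq, h1]
    omega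
  rw [ht]
  exact (List.prefix_iff_eq_take.mp (List.takeWhile_prefix _)).symm

theorem pvComment_idem (s : String) : pvComment (pvComment s) = pvComment s := by
  have hC : ("# Performance: Consider list comprehension for 20-30% improvement".toList).takeWhile PySem.Chars.isspace = [] := by decide
  have hw : ∀ c ∈ s.toList.takeWhile PySem.Chars.isspace, PySem.Chars.isspace c = true :=
    fun c hc => List.mem_takeWhile_imp hc
  have key : (pvComment (pvComment s)).toList = (pvComment s).toList := by
    rw [pvComment_toList, pvComment_toList s, tw_app _ _ _ hw, hC, List.append_nil]
  have h2 := congrArg String.ofList key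
  simpa using h2


def pvBF (c : Int → Nat) : Int → List String → List String
  | _, [] => []
  | i, l :: t => List.replicate (c i) (pvComment l) ++ l :: pvBF c (i + 1) t

theorem pvBF_zero (c : Int → Nat) (i : Int) (ls : List String)
    (h : ∀ j, i ≤ j → c j = 0) : pvBF c i ls = ls := by
  induction ls generalizing i with
  | nil => rfl
  | cons l t ih =>
      simp [pvBF, h i le_rfl, ih (i + 1) (fun j hj => h j (by omega))]

theorem pvBF_congr (c c' : Int → Nat) (i : Int) (ls : List String)
    (h : ∀ j, c j = c' j) : pvBF c i ls = pvBF c' i ls := by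
  induction ls generalizing i with
  | nil => rfl
  | cons l t ih => simp [pvBF, h i, ih (i + 1)]

theorem pvBF_insert (p : Nat) (ls : List String) (i : Int) (c : Int → Nat)
    (hp : p < ls.length) (hc : ∀ j, i + p < j → c j = 0) :
    pvBF c i (ls.take p ++ pvComment ls[p] :: ls.drop p) =
      pvBF (fun j => if j = i + p then c j + 1 else c j) i ls := by
  induction p generalizing ls i with
  | zero =>
      match ls with
      | l :: t =>
        simp only [List.take_zero, List.drop_zero, List.getElem_cons_zero, List.nil_append]
        have hci1 : c (i + 1) = 0 := hc _ (by omega)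
        have h0 : pvBF c (i + 1 + 1) t = t := pvBF_zero c _ t (fun j hj => hc j (by omega))
        have h1 : pvBF (fun j => if j = i + ((0:Nat):Int) then c j + 1 else c j) (i + 1) t = t :=
          pvBF_zero _ (i+1) _ (fun j hj => by
            rw [if_neg (by push_cast; omega)]; exact hc j (by push_cast; omega))
        simp only [pvBF, pvComment_idem, hci1, h0, h1]
        rw [if_pos (by push_cast; ring)]
        simp [List.replicate_succ']
  | succ p ih =>
      match ls with
      | l :: t =>
        have hp' : p < t.length := by simpa using hp
        simp only [List.take_succ_cons, List.drop_succ_cons, List.getElem_cons_succ, List.cons_append]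
        simp only [pvBF]
        rw [ih t (i + 1) hp' (fun j hj => hc j (by push_cast at hj ⊢; omega))]
        rw [if_neg (by push_cast; omega)]
        congr 1
        congr 1
        exact pvBF_congr _ (fun j => if j = i + ((p:Nat)+1 : Nat) then c j + 1 else c j) (i+1) t
          (fun j => by
            by_cases h : j = i + 1 + (p:Int)
            · rw [if_pos h]; exact (if_pos (by push_cast; omega)).symm
            · rw [if_neg h]; exact (if_neg (by push_cast at h ⊢; omega)).symm)


def pvKey (t : List (String × Int)) : Int := (t.lookup "line_number").getD 0


theorem pvLoopA_run (insts : List (List (String × Int))) (ls : List String) (m : Bool)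
    (h1 : ∀ t ∈ insts, 1 ≤ pvKey t)
    (h2 : insts.Pairwise (fun a b => pvKey b ≤ pvKey a)) :
    pvLoopA insts ls m =
      some (pvBF (fun i => (insts.countP (fun t => decide (pvKey t - 1 = i ∧ i < (ls.length : Int)))) ) 0 ls,
            m || insts.any (fun t => decide (pvKey t - 1 < (ls.length : Int)))) := by
  induction insts generalizing ls m with
  | nil =>
      simp only [pvLoopA, List.countP_nil, List.any_nil, Bool.or_false]
      rw [pvBF_zero _ 0 ls (fun j hj => rfl)]
  | cons t rest ih =>
      have hk : 1 ≤ pvKey t := h1 t (by simp)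
      have hrest1 : ∀ u ∈ rest, 1 ≤ pvKey u := fun u hu => h1 u (by simp [hu])
      have hle : ∀ u ∈ rest, pvKey u ≤ pvKey t := fun u hu => (List.pairwise_cons.mp h2).1 u hu
      have hrest2 : rest.Pairwise (fun a b => pvKey b ≤ pvKey a) := (List.pairwise_cons.mp h2).2
      cases hl : t.lookup "line_number" with
      | none => exact absurd hk (by simp [pvKey, hl])
      | some n =>
        have hn : pvKey t = n := by simp [pvKey, hl]
        simp only [pvLoopA, hl, PySem.List.len_eq]
        by_cases hlt : n - 1 < (ls.length : Int)
        · rw [if_pos hlt]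
          have hn1 : (0:Int) ≤ n - 1 := by omega
          have hpi : (((n-1).toNat : Nat) : Int) = n - 1 := Int.toNat_of_nonneg hn1
          have hp : (n-1).toNat < ls.length := by omega
          have hins := PySem.List.insert_natCast ls (n-1).toNat (pvComment ls[(n-1).toNat]) (le_of_lt hp)
          rw [hpi] at hins
          simp only [PySem.List.pyGet?_eq_some_getElem ls hn1 hlt]
          rw [hins, ih _ true hrest1 hrest2]
          have hlen' : (((ls.take (n-1).toNat ++ pvComment ls[(n-1).toNat] :: ls.drop (n-1).toNat).length : Nat) : Int) = (ls.length : Int) + 1 := by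
            simp only [List.length_append, List.length_take, List.length_cons, List.length_drop]
            omega
          have hlist : pvBF (fun i => (rest.countP (fun u => decide (pvKey u - 1 = i ∧ i < (((ls.take (n-1).toNat ++ pvComment ls[(n-1).toNat] :: ls.drop (n-1).toNat).length : Nat) : Int))))) 0 (ls.take (n-1).toNat ++ pvComment ls[(n-1).toNat] :: ls.drop (n-1).toNat)
              = pvBF (fun i => ((t :: rest).countP (fun u => decide (pvKey u - 1 = i ∧ i < (ls.length : Int))))) 0 ls := by
            rw [pvBF_congr _ (fun i => rest.countP (fun u => decide (pvKey u - 1 = i ∧ i < (ls.length : Int)))) 0 _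
              (fun i => List.countP_congr (fun u hu => by
                simp only [decide_eq_true_eq]
                constructor
                · rintro ⟨a, b⟩
                  refine ⟨a, ?_⟩
                  have h3 := hle u hu
                  omega
                · rintro ⟨a, b⟩
                  refine ⟨a, ?_⟩
                  omega))]
            rw [pvBF_insert (n-1).toNat ls 0 _ hp
              (fun j hj => List.countP_eq_zero.mpr (fun u hu => by
                simp only [decide_eq_true_eq, not_and]
                intro hui
                have h3 := hle u hu
                omega))]
            exact pvBF_congr _ _ 0 ls (fun j => by
              rw [List.countP_cons]
              by_cases hj : j = (0 : Int) + (((n-1).toNat : Nat) : Int)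
              · rw [if_pos hj]
                have hd : (decide (pvKey t - 1 = j ∧ j < (ls.length : Int))) = true := by
                  simp only [decide_eq_true_eq]; constructor <;> omega
                rw [hd]; simp
              · rw [if_neg hj]
                have hd : (decide (pvKey t - 1 = j ∧ j < (ls.length : Int))) = false := by
                  simp only [decide_eq_false_iff_not, not_and]
                  intro h'
                  omega
                rw [hd]; simp)
          rw [hlist]
          have hflag : (true || rest.any (fun u => decide (pvKey u - 1 < (((ls.take (n-1).toNat ++ pvComment ls[(n-1).toNat] :: ls.drop (n-1).toNat).length : Nat) : Int))))
              = (m || (t :: rest).any (fun u => decide (pvKey u - 1 < (ls.length : Int)))) := by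
            simp only [List.any_cons, Bool.true_or]
            have hd : (decide (pvKey t - 1 < (ls.length : Int))) = true := by
              simp only [decide_eq_true_eq]; omega
            rw [hd]; simp
          rw [hflag]
        · rw [if_neg hlt]
          rw [ih _ m hrest1 hrest2]
          have hlist : pvBF (fun i => (rest.countP (fun u => decide (pvKey u - 1 = i ∧ i < (ls.length : Int))))) 0 ls
              = pvBF (fun i => ((t :: rest).countP (fun u => decide (pvKey u - 1 = i ∧ i < (ls.length : Int))))) 0 ls := by
            exact pvBF_congr _ _ 0 ls (fun j => by
              rw [List.countP_cons]
              have hd : (decide (pvKey t - 1 = j ∧ j < (ls.length : Int))) = false := by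
                simp only [decide_eq_false_iff_not, not_and]
                intro h'
                omega
              rw [hd]; simp)
          rw [hlist]
          have hflag : (m || rest.any (fun u => decide (pvKey u - 1 < (ls.length : Int))))
              = (m || (t :: rest).any (fun u => decide (pvKey u - 1 < (ls.length : Int)))) := by
            simp only [List.any_cons]
            have hd : (decide (pvKey t - 1 < (ls.length : Int))) = false := by
              simp only [decide_eq_false_iff_not]; omega
            rw [hd]; simp
          rw [hflag]


theorem pvLoopB_run (insts : List (List (String × Int))) (nl : Int) (cnt : PySem.Dict Int Int) (m : Bool)
    (h1 : ∀ t ∈ insts, 1 ≤ pvKey t) :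
    ∃ cnt', pvLoopB insts nl cnt m =
        some (cnt', m || insts.any (fun t => decide (0 ≤ pvKey t - 1 ∧ pvKey t - 1 < nl))) ∧
      ∀ i, cnt'.getD i 0 = cnt.getD i 0 +
        (insts.countP (fun t => decide (pvKey t - 1 = i ∧ 0 ≤ i ∧ i < nl)) : Int) := by
  induction insts generalizing cnt m with
  | nil => exact ⟨cnt, by simp [pvLoopB], fun i => by simp⟩
  | cons t rest ih =>
      have hk : 1 ≤ pvKey t := h1 t (by simp)
      have hrest1 : ∀ u ∈ rest, 1 ≤ pvKey u := fun u hu => h1 u (by simp [hu])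
      cases hl : t.lookup "line_number" with
      | none => exact absurd hk (by simp [pvKey, hl])
      | some n =>
        have hn : pvKey t = n := by simp [pvKey, hl]
        simp only [pvLoopB, hl]
        by_cases hc : 0 ≤ n - 1 ∧ n - 1 < nl
        · rw [if_pos hc]
          obtain ⟨cnt', heq, hcnt⟩ := ih (cnt.insert (n-1) (cnt.getD (n-1) 0 + 1)) true hrest1
          refine ⟨cnt', ?_, ?_⟩
          · rw [heq]
            have hd : decide (0 ≤ pvKey t - 1 ∧ pvKey t - 1 < nl) = true := by
              simp only [decide_eq_true_eq]; omega
            rw [List.any_cons, hd]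
            simp
          · intro i
            rw [hcnt i, PySem.Dict.getD_insert, List.countP_cons]
            by_cases hi : i = n - 1
            · rw [if_pos hi]
              have hd : decide (pvKey t - 1 = i ∧ 0 ≤ i ∧ i < nl) = true := by
                simp only [decide_eq_true_eq]; refine ⟨by omega, by omega, by omega⟩
              rw [hd, hi]
              push_cast
              simp
              omega
            · rw [if_neg hi]
              have hd : decide (pvKey t - 1 = i ∧ 0 ≤ i ∧ i < nl) = false := by
                simp only [decide_eq_false_iff_not, not_and]
                intro h'
                omega
              rw [hd]
              simp
        · rw [if_neg hc]
          obtain ⟨cnt', heq, hcnt⟩ := ih cnt m hrest1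
          refine ⟨cnt', ?_, ?_⟩
          · rw [heq]
            have hd : decide (0 ≤ pvKey t - 1 ∧ pvKey t - 1 < nl) = false := by
              simp only [decide_eq_false_iff_not, not_and]
              intro h'
              omega
            rw [List.any_cons, hd]
            simp
          · intro i
            rw [hcnt i, List.countP_cons]
            have hd : decide (pvKey t - 1 = i ∧ 0 ≤ i ∧ i < nl) = false := by
              simp only [decide_eq_false_iff_not, not_and]
              intro h'
              omega
            rw [hd]
            simp


theorem pvRebuild_eq_bF (cnt : PySem.Dict Int Int) (ls : List String) (s : Int) (acc : List String) :
    (PySem.List.enumerate ls s).foldl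
      (fun acc p => acc ++ List.replicate (cnt.getD p.1 0).toNat (pvComment p.2) ++ [p.2]) acc =
      acc ++ pvBF (fun i => (cnt.getD i 0).toNat) s ls := by
  induction ls generalizing s acc with
  | nil => simp [PySem.List.enumerate_nil, pvBF]
  | cons l t ih =>
      rw [PySem.List.enumerate_cons]
      simp only [List.foldl_cons, ih (s + 1), pvBF]
      simp


theorem pv_main (lines : List String) (issue : List (String × List (List (String × Int))))
    (hpre : ∀ t ∈ (issue.lookup "instances").getD [], 1 ≤ pvKey t) :
    apply_list_comprehension_optimizations_py lines issue =
      apply_list_comprehension_optimizations_py_alt lines issue := by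
  unfold apply_list_comprehension_optimizations_py apply_list_comprehension_optimizations_py_alt
  simp only []
  set instances := (issue.lookup "instances").getD [] with hinst
  have hperm := PySem.List.sorted_perm instances pvKey true
  have h1s : ∀ t ∈ PySem.List.sorted instances pvKey true, 1 ≤ pvKey t :=
    fun t ht => hpre t (hperm.mem_iff.mp ht)
  have h2s := PySem.List.sorted_pairwise_rev instances pvKey
  have hA : PySem.List.sorted instances (fun t => (t.lookup "line_number").getD 0) true
      = PySem.List.sorted instances pvKey true := rfl
  rw [hA, pvLoopA_run _ lines false h1s h2s]
  obtain ⟨cnt', heq, hcnt⟩ := pvLoopB_run instances (PySem.List.len lines) PySem.Dict.empty false hpre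
  rw [heq]
  simp only [Option.getD_some]
  have hrebuild : pvRebuild cnt' lines = pvBF (fun i => (cnt'.getD i 0).toNat) 0 lines := by
    have := pvRebuild_eq_bF cnt' lines 0 []
    simpa [pvRebuild] using this
  have hcount : ∀ i, ((PySem.List.sorted instances pvKey true).countP
        (fun t => decide (pvKey t - 1 = i ∧ i < (lines.length : Int)))) = (cnt'.getD i 0).toNat := by
    intro i
    rw [hcnt i]
    simp only [PySem.Dict.getD_empty, zero_add, PySem.List.len_eq, Int.toNat_natCast]
    rw [hperm.countP_eq]
    exact List.countP_congr (fun u hu => by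
      simp only [decide_eq_true_eq]
      constructor
      · rintro ⟨a, b⟩
        have := hpre u hu
        exact ⟨a, by omega, b⟩
      · rintro ⟨a, _, b⟩
        exact ⟨a, b⟩)
  have hany : (PySem.List.sorted instances pvKey true).any
        (fun t => decide (pvKey t - 1 < (lines.length : Int)))
      = instances.any (fun t => decide (0 ≤ pvKey t - 1 ∧ pvKey t - 1 < PySem.List.len lines)) := by
    rw [List.Perm.any_eq hperm]
    exact PySem.List.any_congr_mem (fun u hu => by
      have h3 := hpre u hu
      simp only [PySem.List.len_eq]
      rw [decide_eq_decide]
      omega)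
  rw [hrebuild] at *
  refine Prod.ext ?_ ?_
  · simp only []
    rw [pvBF_congr _ _ 0 lines (fun i => hcount i)]
  · simp only []
    rw [hany]

-- ===== VERDICT (by name: the statement is the Claim_ definition above) =====
theorem apply_list_comprehension_optimizations_py_spec : Claim_equal_apply_list_comprehension_optimizations_py := by
  intro lines issue _hdom hpre
  unfold Spec_apply_list_comprehension_optimizations_py
  unfold Pre_apply_list_comprehension_optimizations_py at hpre
  exact pv_main lines issue hpre
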